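-- pv_equiv track=rewrite | github.com/dinhhung1598753/test-management-api | main.py | remove_elements_info
-- ===== SOURCE A (Python) =====
-- def remove_elements_info(arr):
--     result = []
--     i = 0
--     while i < len(arr):
--         item = arr[i]
--         result.append(item)
--         j = i + 1
--         while j < len(arr) and abs(item[1] - arr[j][1]) <= 5:
--             if arr[j][3] > item[3]:
--                 result.pop()  # Loại bỏ phần tử đã thêm trước đó
--                 break
--             j += 1
--         i = j
--     return result
-- ===== SOURCE B (Python) =====
-- def remove_elements_info(arr):
--     result = []
--     for x in arr:
--         if not result or abs(result[-1][1] - x[1]) > 5: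
--             result.append(x)
--         elif x[3] > result[-1][3]:
--             result[-1] = x
--     return result
-- ===== Notes on version B (the rewrite author's own statement) =====
-- stated objective: simpler
-- what changed: Replaced the nested while-loops with index jumps and pop/break by a single flat pass that, per element, appends, replaces the last kept element, or skips, comparing against result[-1].
import Mathlib
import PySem

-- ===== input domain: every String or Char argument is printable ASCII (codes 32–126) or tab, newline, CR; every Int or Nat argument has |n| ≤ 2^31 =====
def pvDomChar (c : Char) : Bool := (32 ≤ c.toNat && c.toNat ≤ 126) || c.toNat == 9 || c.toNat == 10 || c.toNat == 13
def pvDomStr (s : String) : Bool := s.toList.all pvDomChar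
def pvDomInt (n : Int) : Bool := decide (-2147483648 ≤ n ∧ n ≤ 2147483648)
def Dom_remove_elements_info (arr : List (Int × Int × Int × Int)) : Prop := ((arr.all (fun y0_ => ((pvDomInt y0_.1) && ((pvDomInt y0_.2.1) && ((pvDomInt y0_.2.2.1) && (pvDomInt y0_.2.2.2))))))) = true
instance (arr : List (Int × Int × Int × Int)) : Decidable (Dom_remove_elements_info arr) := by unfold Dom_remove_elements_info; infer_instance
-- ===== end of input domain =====

-- B replaces A's nested while-loops (inner scan with pop/break and an index jump i = j)
-- by one flat pass that appends, replaces the last kept element, or skips each element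
-- (objective: simpler).

-- ===== PORT A =====
-- inner while loop: returns (final j, whether result was popped/broken)
def pyScan (arr : List (Int × Int × Int × Int)) (item : Int × Int × Int × Int)
    (j : Nat) : Nat × Bool :=
  if h : j < arr.length then
    if |item.2.1 - (arr[j]).2.1| ≤ 5 then
      if (arr[j]).2.2.2 > item.2.2.2 then (j, true)
      else pyScan arr item (j+1)
    else (j, false)
  else (j, false)
termination_by arr.length - j

-- the port's outer loop needs this for termination
theorem pyScan_ge (arr : List (Int × Int × Int × Int)) (item : Int × Int × Int × Int)
    (j : Nat) : j ≤ (pyScan arr item j).1 := by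
  fun_induction pyScan arr item j with
  | case1 => simp
  | case2 j h hc hb ih => omega
  | case3 => simp
  | case4 => simp

-- outer while loop
def loopA (arr : List (Int × Int × Int × Int)) (i : Nat)
    (result : List (Int × Int × Int × Int)) : List (Int × Int × Int × Int) :=
  if h : i < arr.length then
    let item := arr[i]
    let result' := result ++ [item]          -- result.append(item)
    let s := pyScan arr item (i+1)
    loopA arr s.1 (if s.2 then result'.dropLast else result')   -- result.pop() iff broken
  else result
termination_by arr.length - i
decreasing_by
  have := pyScan_ge arr arr[i] (i+1)
  omega

def remove_elements_info (arr : List (Int × Int × Int × Int)) : List (Int × Int × Int × Int) :=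
  loopA arr 0 []

-- ===== PORT B =====
def stepB (result : List (Int × Int × Int × Int)) (x : Int × Int × Int × Int) :
    List (Int × Int × Int × Int) :=
  match result.getLast? with
  | none => result ++ [x]                                         -- not result: append
  | some a =>
    if |a.2.1 - x.2.1| > 5 then result ++ [x]                     -- far: append
    else if x.2.2.2 > a.2.2.2 then result.dropLast ++ [x]         -- close & bigger: result[-1] = x
    else result                                                   -- close & not bigger: skip

def remove_elements_info_alt (arr : List (Int × Int × Int × Int)) : List (Int × Int × Int × Int) :=
  arr.foldl stepB []

-- ===== PRECONDITION & SPEC =====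
def Spec_remove_elements_info (arr : List (Int × Int × Int × Int)) (out : List (Int × Int × Int × Int)) : Prop := out = remove_elements_info_alt arr
instance (arr : List (Int × Int × Int × Int)) (out : List (Int × Int × Int × Int)) : Decidable (Spec_remove_elements_info arr out) := by unfold Spec_remove_elements_info; infer_instance

-- ===== CLAIM (what is proved, stated in full; the proofs are below) =====
def Claim_equal_remove_elements_info : Prop := ∀ (arr : List (Int × Int × Int × Int)), Dom_remove_elements_info arr → Spec_remove_elements_info arr (remove_elements_info arr)

-- ===== LEMMAS AND PROOFS =====

-- key invariant: A's continuation after appending `item` at some outer index equals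
-- B's fold over the remaining suffix starting from a result ending in `item`.
theorem key (arr : List (Int × Int × Int × Int)) :
    ∀ n j (item : Int × Int × Int × Int) (r0 : List (Int × Int × Int × Int)),
      arr.length - j ≤ n →
      loopA arr (pyScan arr item j).1
        (if (pyScan arr item j).2 then r0 else r0 ++ [item])
      = List.foldl stepB (r0 ++ [item]) (arr.drop j) := by
  intro n
  induction n with
  | zero =>
    intro j item r0 hn
    have hj : ¬ j < arr.length := by omega
    rw [pyScan]; simp only [dif_neg hj]
    rw [loopA]; simp only [dif_neg hj]
    rw [List.drop_eq_nil_of_le (by omega)]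
    simp
  | succ n ih =>
    intro j item r0 hn
    by_cases hj : j < arr.length
    · have hd : arr.drop j = arr[j] :: arr.drop (j+1) := List.drop_eq_getElem_cons hj
      rw [hd, List.foldl_cons]
      by_cases hclose : |item.2.1 - (arr[j]).2.1| ≤ 5
      · by_cases hbig : (arr[j]).2.2.2 > item.2.2.2
        · -- pop & break: B replaces the last element
          rw [pyScan]; simp only [dif_pos hj, if_pos hclose, if_pos hbig]
          rw [loopA]; simp only [dif_pos hj]
          rw [List.dropLast_concat]
          have hb : stepB (r0 ++ [item]) arr[j] = r0 ++ [arr[j]] := by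
            simp only [stepB, List.getLast?_concat]
            rw [if_neg (by omega), if_pos hbig, List.dropLast_concat]
          rw [hb]
          exact ih (j+1) arr[j] r0 (by omega)
        · -- close, not bigger: both skip
          rw [pyScan]; simp only [dif_pos hj, if_pos hclose, if_neg hbig]
          have hb : stepB (r0 ++ [item]) arr[j] = r0 ++ [item] := by
            simp only [stepB, List.getLast?_concat]
            rw [if_neg (by omega), if_neg hbig]
          rw [hb]
          exact ih (j+1) item r0 (by omega)
      · -- far: scan ends, A appends arr[j] as new item; B appends
        rw [pyScan]; simp only [dif_pos hj, if_neg hclose]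
        rw [loopA]; simp only [dif_pos hj]
        rw [List.dropLast_concat]
        have hb : stepB (r0 ++ [item]) arr[j] = (r0 ++ [item]) ++ [arr[j]] := by
          simp only [stepB, List.getLast?_concat]
          rw [if_pos (by omega)]
        rw [hb]
        exact ih (j+1) arr[j] (r0 ++ [item]) (by omega)
    · rw [pyScan]; simp only [dif_neg hj]
      rw [loopA]; simp only [dif_neg hj]
      rw [List.drop_eq_nil_of_le (by omega)]
      simp

theorem main_eq (arr : List (Int × Int × Int × Int)) :
    remove_elements_info arr = remove_elements_info_alt arr := by
  cases arr with
  | nil =>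
    unfold remove_elements_info remove_elements_info_alt
    rw [loopA]; simp
  | cons x t =>
    unfold remove_elements_info remove_elements_info_alt
    rw [loopA]
    simp only [List.length_cons, Nat.zero_lt_succ, dif_pos, List.getElem_cons_zero,
      List.nil_append, List.foldl_cons]
    have hs : stepB [] x = [x] := rfl
    rw [hs]
    have hd : ([x] : List (Int × Int × Int × Int)).dropLast = [] := rfl
    rw [hd]
    have hk := key (x :: t) (x :: t).length 1 x [] (by omega)
    simp only [List.nil_append] at hk
    simpa using hk

-- ===== VERDICT (by name: the statement is the Claim_ definition above) =====
theorem remove_elements_info_spec : Claim_equal_remove_elements_info := by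
  intro arr _
  exact main_eq arr
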